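-- pv_equiv track=rewrite | github.com/D-Katt/AI-Machine-Learning | Text_readability_score/USE_encoder.py | process_characters
-- ===== SOURCE A (Python) =====
-- import string
-- from collections import Counter
--
-- def process_characters(s: str) -> tuple:
--     """Function calculates total number of punctuation signs in the text,
--     number of sentences assuming any sentence contains just one '.' or '?' or '!'
--     and the number of quotes in the text.
--     :param s: Original text string with punctuation
--     :return: Tuple with 5 int values: total number of sentences,
--     total number of punctuation signs, number of quotation pairs,
--     number of vowels, number of digits
--     """
--     chars = Counter(s)
--     # Number of sentences
--     sentences = 0
--     for char in '.?!':
--         sentences += chars[char]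
--     # Total number of punctuation signs
--     punct_signs = 0
--     for char in string.punctuation:
--         punct_signs += chars[char]
--     # Number of vowels
--     vowels = 0
--     for char in 'aeiouy':
--         vowels += chars[char]
--     # Number of digits
--     digits = 0
--     for char in '0123456789':
--         digits += chars[char]
--     return sentences, punct_signs, chars['"'] // 2, vowels, digits
-- ===== SOURCE B (Python) =====
-- import string
--
-- def process_characters(s: str) -> tuple:
--     """Single pass over the characters with independent accumulators."""
--     sentence_marks = {'.', '?', '!'}
--     punct_set = set(string.punctuation)
--     vowel_set = set('aeiouy')
--     digit_set = set('0123456789')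
--     sentences = punct_signs = quotes = vowels = digits = 0
--     for c in s:
--         if c in sentence_marks:
--             sentences += 1
--         if c in punct_set:
--             punct_signs += 1
--         if c == '"':
--             quotes += 1
--         if c in vowel_set:
--             vowels += 1
--         if c in digit_set:
--             digits += 1
--     return sentences, punct_signs, quotes // 2, vowels, digits
-- ===== Notes on version B (the rewrite author's own statement) =====
-- stated objective: simpler
-- what changed: Replaced the Counter table plus four fixed category loops with one direct pass over the text that increments five independent accumulators per character.
import Mathlib
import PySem

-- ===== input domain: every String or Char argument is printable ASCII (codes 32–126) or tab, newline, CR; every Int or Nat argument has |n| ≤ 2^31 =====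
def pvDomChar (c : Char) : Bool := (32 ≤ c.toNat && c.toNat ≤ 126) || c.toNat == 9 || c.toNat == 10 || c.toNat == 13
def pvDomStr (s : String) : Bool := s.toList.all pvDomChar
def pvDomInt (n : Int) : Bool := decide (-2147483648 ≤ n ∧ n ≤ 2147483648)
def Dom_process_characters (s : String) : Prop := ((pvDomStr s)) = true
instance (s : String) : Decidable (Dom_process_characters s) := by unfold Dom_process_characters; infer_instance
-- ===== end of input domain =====

-- B replaces the Counter table plus four fixed category loops with one direct pass
-- over the text updating five independent accumulators (simpler decomposition).

-- ===== PORT A =====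
-- string.punctuation
def pvPunct : List Char := "!\"#$%&'()*+,-./:;<=>?@[\\]^_`{|}~".toList

def process_characters (s : String) : Int × Int × Int × Int × Int :=
  let chars : PySem.Dict Char Int := PySem.Dict.counter s.toList
  let sentences : Int := ".?!".toList.foldl (fun acc c => acc + chars.getD c 0) 0
  let punct_signs : Int := pvPunct.foldl (fun acc c => acc + chars.getD c 0) 0
  let vowels : Int := "aeiouy".toList.foldl (fun acc c => acc + chars.getD c 0) 0
  let digits : Int := "0123456789".toList.foldl (fun acc c => acc + chars.getD c 0) 0
  (sentences, punct_signs, PySem.Int.floordiv (chars.getD '"' 0) 2, vowels, digits)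

-- ===== PORT B =====
def pvSentenceMarks : List Char := ['.', '?', '!']
def pvVowels : List Char := "aeiouy".toList
def pvDigits : List Char := "0123456789".toList

def pvStep (st : Int × Int × Int × Int × Int) (c : Char) : Int × Int × Int × Int × Int :=
  let sen := if c ∈ pvSentenceMarks then st.1 + 1 else st.1
  let pun := if c ∈ pvPunct then st.2.1 + 1 else st.2.1
  let quo := if c = '"' then st.2.2.1 + 1 else st.2.2.1
  let vow := if c ∈ pvVowels then st.2.2.2.1 + 1 else st.2.2.2.1
  let dig := if c ∈ pvDigits then st.2.2.2.2 + 1 else st.2.2.2.2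
  (sen, pun, quo, vow, dig)

def process_characters_alt (s : String) : Int × Int × Int × Int × Int :=
  let r := s.toList.foldl pvStep (0, 0, 0, 0, 0)
  (r.1, r.2.1, PySem.Int.floordiv r.2.2.1 2, r.2.2.2.1, r.2.2.2.2)

-- ===== PRECONDITION & SPEC =====
def Spec_process_characters (s : String) (out : Int × Int × Int × Int × Int) : Prop := out = process_characters_alt s
instance (s : String) (out : Int × Int × Int × Int × Int) : Decidable (Spec_process_characters s out) := by unfold Spec_process_characters; infer_instance

-- ===== CLAIM (what is proved, stated in full; the proofs are below) =====
def Claim_equal_process_characters : Prop := ∀ (s : String), Dom_process_characters s → Spec_process_characters s (process_characters s)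

-- ===== LEMMAS AND PROOFS =====

-- A's accumulating loop over a key list is the sum of per-character counts
theorem foldl_add_count (l ks : List Char) (a : Int) :
    ks.foldl (fun acc c => acc + (l.count c : Int)) a
      = a + ((ks.map fun c => (l.count c : Int)).sum) := by
  induction ks generalizing a with
  | nil => simp
  | cons k ks ih =>
    rw [List.foldl_cons, ih]
    simp
    ring

-- with a fresh head key, counting membership in the cons splits off a count
theorem countP_mem_cons (a : Char) (ks l : List Char) (h : a ∉ ks) :
    l.countP (fun c => decide (c ∈ a :: ks))
      = l.count a + l.countP (fun c => decide (c ∈ ks)) := by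
  induction l with
  | nil => simp
  | cons x l ih =>
    simp only [List.countP_cons, List.count_cons, ih]
    by_cases hx : x = a
    · subst hx
      simp [h]
      omega
    · by_cases hm : x ∈ ks <;> simp [hx, hm] <;> omega

theorem sum_counts_eq_countP (ks l : List Char) (hnd : ks.Nodup) :
    ((ks.map fun c => (l.count c : Int)).sum)
      = (l.countP (fun c => decide (c ∈ ks)) : Int) := by
  induction ks with
  | nil => simp
  | cons k ks ih =>
    rcases List.nodup_cons.mp hnd with ⟨hk, hnd'⟩
    rw [List.map_cons, List.sum_cons, ih hnd', countP_mem_cons k ks l hk]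
    push_cast
    ring

-- invariant of B's single pass
theorem foldl_pvStep (l : List Char) (sen pun quo vow dig : Int) :
    l.foldl pvStep (sen, pun, quo, vow, dig)
      = (sen + (l.countP (fun c => decide (c ∈ pvSentenceMarks)) : Int),
         pun + (l.countP (fun c => decide (c ∈ pvPunct)) : Int),
         quo + (l.count '"' : Int),
         vow + (l.countP (fun c => decide (c ∈ pvVowels)) : Int),
         dig + (l.countP (fun c => decide (c ∈ pvDigits)) : Int)) := by
  induction l generalizing sen pun quo vow dig with
  | nil => simp
  | cons x l ih =>
    rw [List.foldl_cons]
    simp only [pvStep]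
    rw [ih]
    simp only [List.countP_cons, List.count_cons, Prod.ext_iff]
    refine ⟨?_, ?_, ?_, ?_, ?_⟩
    · by_cases h : x ∈ pvSentenceMarks <;> simp [h] <;> omega
    · by_cases h : x ∈ pvPunct <;> simp [h] <;> omega
    · by_cases h : x = '"' <;> simp [h] <;> omega
    · by_cases h : x ∈ pvVowels <;> simp [h] <;> omega
    · by_cases h : x ∈ pvDigits <;> simp [h] <;> omega

-- ===== VERDICT (by name: the statement is the Claim_ definition above) =====
theorem process_characters_spec : Claim_equal_process_characters := by
  intro s _
  show process_characters s = process_characters_alt s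
  unfold process_characters process_characters_alt
  rw [foldl_pvStep]
  simp only [PySem.Dict.getD_counter, foldl_add_count]
  have hs : ".?!".toList = pvSentenceMarks := rfl
  have hv : "aeiouy".toList = pvVowels := rfl
  have hd : "0123456789".toList = pvDigits := rfl
  rw [hs, hv, hd,
      sum_counts_eq_countP _ _ (by decide), sum_counts_eq_countP _ _ (by decide),
      sum_counts_eq_countP _ _ (by decide), sum_counts_eq_countP _ _ (by decide)]
  simp
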